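-- pv_equiv track=rewrite | github.com/gahogg/leetcode-answers | Lucky Numbers in a Matrix.py | _get_maximum_in_col_mat
-- ===== SOURCE A (Python) =====
-- def _get_maximum_in_col_mat(matrix):
--     m, n = len(matrix), len(matrix[0])
--     is_maximum_in_col_mat = [[0] * n for i in range(m)]
--
--     for i in range(n):
--         max_j = 0
--         for j in range(m):
--             if matrix[j][i] > matrix[max_j][i]:
--                 max_j = j
--         is_maximum_in_col_mat[max_j][i] = 1
--     return is_maximum_in_col_mat
-- ===== SOURCE B (Python) =====
-- def _get_maximum_in_col_mat(matrix):
--     m, n = len(matrix), len(matrix[0])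
--     best = [sorted(range(m), key=lambda j: (-matrix[j][i], j))[0] for i in range(n)]
--     return [[1 if best[i] == j else 0 for i in range(n)] for j in range(m)]
-- ===== Notes on version B (the rewrite author's own statement) =====
-- stated objective: alternative
-- what changed: A marks cells in a mutable zero matrix by a single running-argmax scan per column; B instead selects each column's winner by sorting the row indices under the key (-value, index) and taking the head of the sorted order, then builds the whole result non-destructively by comprehension from the list of winners.
import Mathlib
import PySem

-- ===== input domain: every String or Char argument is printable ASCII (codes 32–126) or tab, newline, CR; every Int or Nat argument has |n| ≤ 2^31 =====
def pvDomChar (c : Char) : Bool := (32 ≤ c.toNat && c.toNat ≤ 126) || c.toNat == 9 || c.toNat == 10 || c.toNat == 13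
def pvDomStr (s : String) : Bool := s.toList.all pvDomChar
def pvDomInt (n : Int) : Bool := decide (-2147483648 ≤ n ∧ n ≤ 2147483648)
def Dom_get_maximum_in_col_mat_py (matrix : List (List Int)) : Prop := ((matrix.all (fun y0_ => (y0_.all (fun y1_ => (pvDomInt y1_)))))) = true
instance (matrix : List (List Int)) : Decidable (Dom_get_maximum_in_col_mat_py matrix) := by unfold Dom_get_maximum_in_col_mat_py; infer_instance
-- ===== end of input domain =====

-- B replaces A's in-place marking with a running argmax by a sort-based selection: per column it
-- sorts the row indices by the key (-value, index) and takes the head, then builds the result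
-- non-destructively by comprehension (objective: alternative).

-- ===== PORT A =====
-- len(matrix[0]) is total here via pyGetD _ 0 []; Pre_ excludes the empty matrix, where Python raises.
def get_maximum_in_col_mat_py (matrix : List (List Int)) : List (List Int) :=
  let m : Int := matrix.length
  let n : Int := (PySem.List.pyGetD matrix 0 []).length
  let is_max : List (List Int) :=
    (PySem.List.pyRange 0 m).map (fun _ => List.replicate n.toNat (0 : Int))
  (PySem.List.pyRange 0 n).foldl (fun acc i =>
    let max_j : Int :=
      (PySem.List.pyRange 0 m).foldl (fun max_j j =>
        if PySem.List.pyGetD (PySem.List.pyGetD matrix j []) i 0 >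
           PySem.List.pyGetD (PySem.List.pyGetD matrix max_j []) i 0 then j else max_j) 0
    PySem.List.pySetD acc max_j
      (PySem.List.pySetD (PySem.List.pyGetD acc max_j []) i 1)) is_max

-- ===== PORT B =====
-- sorted(range(m), key=lambda j: (-matrix[j][i], j)) ported as PySem.List.sorted2 (tuple key);
-- [0] ported as pyGetD _ 0 0: exact where the sorted list is nonempty (guaranteed under Pre_;
-- Python raises there exactly when A already raised on len(matrix[0])).
def get_maximum_in_col_mat_py_alt (matrix : List (List Int)) : List (List Int) :=
  let m : Int := matrix.length
  let n : Int := (PySem.List.pyGetD matrix 0 []).length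
  let best : List Int :=
    (PySem.List.pyRange 0 n).map (fun i =>
      PySem.List.pyGetD
        (PySem.List.sorted2 (PySem.List.pyRange 0 m)
          (fun j => -(PySem.List.pyGetD (PySem.List.pyGetD matrix j []) i 0))
          (fun j => j)) 0 0)
  (PySem.List.pyRange 0 m).map (fun j =>
    (PySem.List.pyRange 0 n).map (fun i =>
      if PySem.List.pyGetD best i 0 = j then (1 : Int) else 0))

-- ===== PRECONDITION & SPEC =====
-- Pre_ = exactly where Python A returns: a nonempty matrix (else len(matrix[0]) raises IndexError)
-- whose every row has at least len(matrix[0]) entries (else matrix[j][i] raises IndexError).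
def Pre_get_maximum_in_col_mat_py (matrix : List (List Int)) : Prop :=
  matrix ≠ [] ∧ ∀ row ∈ matrix, (PySem.List.pyGetD matrix 0 []).length ≤ row.length
instance (matrix : List (List Int)) : Decidable (Pre_get_maximum_in_col_mat_py matrix) := by
  unfold Pre_get_maximum_in_col_mat_py; infer_instance
def pvWitness_get_maximum_in_col_mat_py : List (List Int) := [[1, 2], [3, 4]]

def Spec_get_maximum_in_col_mat_py (matrix : List (List Int)) (out : List (List Int)) : Prop := out = get_maximum_in_col_mat_py_alt matrix
instance (matrix : List (List Int)) (out : List (List Int)) : Decidable (Spec_get_maximum_in_col_mat_py matrix out) := by unfold Spec_get_maximum_in_col_mat_py; infer_instance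

-- ===== CLAIM (what is proved, stated in full; the proofs are below) =====
def Claim_equal_get_maximum_in_col_mat_py : Prop := ∀ (matrix : List (List Int)), Dom_get_maximum_in_col_mat_py matrix → Pre_get_maximum_in_col_mat_py matrix → Spec_get_maximum_in_col_mat_py matrix (get_maximum_in_col_mat_py matrix)

-- ===== LEMMAS AND PROOFS =====

-- matrix[j][i] as a total function of the two Nat indices.
def pvV (matrix : List (List Int)) (i j : Nat) : Int :=
  PySem.List.pyGetD (PySem.List.pyGetD matrix (j : Int) []) (i : Int) 0

-- A's running argmax over indices 0..m-1, in Nat.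
def pvAF (v : Nat → Int) (m : Nat) : Nat :=
  (List.range m).foldl (fun mj j => if v j > v mj then j else mj) 0

-- "s is the first index of the maximum among v 0 .. v (m-1)".
def pvFirstMax (v : Nat → Int) (m s : Nat) : Prop :=
  s < m ∧ (∀ j < m, v j ≤ v s) ∧ (∀ j < s, v j < v s)

-- entry (j,i) of an accumulator matrix, totalised like the ports read it.
def pvEntry (acc : List (List Int)) (j i : Nat) : Int :=
  PySem.List.pyGetD (PySem.List.pyGetD acc (j : Int) []) (i : Int) 0

def pvB (matrix : List (List Int)) (i : Nat) : Nat := pvAF (pvV matrix i) matrix.length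

-- B's per-column head-of-sorted selection, over the cast Nat range, at Nat column i.
def pvH (matrix : List (List Int)) (i : Nat) : Int :=
  PySem.List.pyGetD
    (PySem.List.sorted2 ((List.range matrix.length).map (fun k : Nat => (k : Int)))
      (fun j => -(PySem.List.pyGetD (PySem.List.pyGetD matrix j []) ((i : Nat) : Int) 0))
      (fun j => j)) 0 0

def pvInit (matrix : List (List Int)) : List (List Int) :=
  (List.range matrix.length).map (fun _ => List.replicate (PySem.List.pyGetD matrix 0 []).length (0 : Int))

lemma pvAF_spec (v : Nat → Int) : ∀ m, 0 < m → pvFirstMax v m (pvAF v m) := by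
  intro m
  induction m with
  | zero => omega
  | succ k ih =>
    intro _
    rcases Nat.eq_zero_or_pos k with hk | hk
    · subst hk
      have h0 : pvAF v 1 = 0 := by simp [pvAF, List.range_succ]
      rw [h0]
      refine ⟨by omega, ?_, by omega⟩
      intro j hj
      interval_cases j
      exact le_refl _
    · obtain ⟨h1, h2, h3⟩ := ih hk
      have hAF : pvAF v (k + 1) = if v k > v (pvAF v k) then k else pvAF v k := by
        simp [pvAF, List.range_succ]
      rw [hAF]
      split_ifs with hgt
      · refine ⟨by omega, ?_, ?_⟩
        · intro j hj
          rcases Nat.lt_succ_iff_lt_or_eq.mp hj with h | h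
          · exact le_of_lt (lt_of_le_of_lt (h2 j h) hgt)
          · subst h; exact le_refl _
        · intro j hj
          exact lt_of_le_of_lt (h2 j hj) hgt
      · refine ⟨by omega, ?_, h3⟩
        intro j hj
        rcases Nat.lt_succ_iff_lt_or_eq.mp hj with h | h
        · exact h2 j h
        · subst h; exact not_lt.mp hgt

-- A's Int-state fold is the cast of the Nat-state fold.
lemma pvAF_cast (v : Nat → Int) (w : Int → Int) (hw : ∀ s : Nat, w (s : Int) = v s) :
    ∀ (l : List Nat) (s : Nat),
      l.foldl (fun (mj : Int) (j : Nat) => if v j > w mj then (j : Int) else mj) (s : Int)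
        = ((l.foldl (fun mj j => if v j > v mj then j else mj) s : Nat) : Int) := by
  intro l
  induction l with
  | nil => intro s; rfl
  | cons a l ih =>
    intro s
    simp only [List.foldl_cons, hw s]
    split_ifs with h <;> exact ih _

-- sorted2 with Int keys IS sorted under the lexicographic key: the two insertion predicates agree.
lemma pvSorted2_eq_sorted_lex (xs : List Int) (k1 k2 : Int → Int) :
    PySem.List.sorted2 xs k1 k2 false
      = PySem.List.sorted xs (fun a => toLex (k1 a, k2 a)) false := by
  unfold PySem.List.sorted2 PySem.List.sorted
  simp only [if_neg (by decide : ¬ (false = true))]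
  have hbef : (fun a b => decide (k1 a < k1 b) || !decide (k1 b < k1 a) && decide (k2 a < k2 b))
      = (fun a b : Int => decide (toLex (k1 a, k2 a) < toLex (k1 b, k2 b))) := by
    funext a b
    by_cases h1 : k1 a < k1 b
    · simp [h1, Prod.Lex.lt_iff]
    · by_cases h2 : k1 b < k1 a
      · simp [h1, h2, Prod.Lex.lt_iff, ne_of_gt h2]
      · have he : k1 a = k1 b := le_antisymm (not_lt.mp h2) (not_lt.mp h1)
        by_cases h3 : k2 a < k2 b <;> simp [h1, h2, h3, he, Prod.Lex.lt_iff]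
  rw [hbef]

-- head of the (-value, index)-sorted index list = the first index of the maximum.
lemma pvHead_first_max (w : Int → Int) (m : Nat) (s : Nat)
    (h : pvFirstMax (fun j : Nat => w (j : Int)) m s) :
    PySem.List.pyGetD
      (PySem.List.sorted2 ((List.range m).map (fun k : Nat => (k : Int)))
        (fun j => -(w j)) (fun j => j)) 0 0 = (s : Int) := by
  obtain ⟨hs, hmax, hfirst⟩ := h
  set xs : List Int := (List.range m).map (fun k : Nat => (k : Int)) with hxs
  rw [pvSorted2_eq_sorted_lex xs (fun j => -(w j)) (fun j => j)]
  set key : Int → Lex (Int × Int) := fun j => toLex (-(w j), j) with hkey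
  have hne : xs ≠ [] := by
    simp only [hxs, ne_eq, List.map_eq_nil_iff, List.range_eq_nil]
    omega
  obtain ⟨hd, tl, hsor⟩ : ∃ hd tl, PySem.List.sorted xs key false = hd :: tl := by
    cases hcase : PySem.List.sorted xs key false with
    | nil => exact absurd ((PySem.List.sorted_eq_nil_iff xs key false).mp hcase) hne
    | cons hd tl => exact ⟨hd, tl, rfl⟩
  have hkeyle : ∀ y ∈ xs, key hd ≤ key y := PySem.List.key_head_sorted_le xs key hsor
  have hhdmem : hd ∈ xs := (PySem.List.mem_sorted xs key false hd).mp (hsor ▸ List.mem_cons_self)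
  have hsmem : (s : Int) ∈ xs := by
    simp only [hxs, List.mem_map]
    exact ⟨s, List.mem_range.mpr hs, rfl⟩
  -- key s is minimal among all of xs
  have hsmin : ∀ y ∈ xs, key (s : Int) ≤ key y := by
    intro y hy
    obtain ⟨jN, hjN, rfl⟩ := List.mem_map.mp hy
    have hjm : jN < m := List.mem_range.mp hjN
    have hle : w (jN : Int) ≤ w (s : Int) := hmax jN hjm
    rw [hkey, Prod.Lex.le_iff]
    simp only [ofLex_toLex]
    rcases lt_or_eq_of_le hle with hlt | heq
    · left; exact neg_lt_neg hlt
    · right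
      refine ⟨by rw [heq], ?_⟩
      by_contra hc
      have hjs : jN < s := by exact_mod_cast not_le.mp hc
      exact absurd heq (ne_of_lt (hfirst jN hjs))
  have h1 : key hd ≤ key (s : Int) := hkeyle _ hsmem
  have h2 : key (s : Int) ≤ key hd := hsmin _ hhdmem
  have hkeq : key hd = key (s : Int) := le_antisymm h1 h2
  have hd_eq : hd = (s : Int) := by
    have := congrArg (fun p : Lex (Int × Int) => (ofLex p).2) hkeq
    simpa [hkey] using this
  rw [hsor, hd_eq]
  simp [PySem.List.pyGetD]

-- the outer write loop: entries of the folded accumulator.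
lemma pvOuter (b : Nat → Nat) (nn : Nat) :
    ∀ (L : List Nat) (acc : List (List Int)),
      (∀ row ∈ acc, row.length = nn) →
      (∀ i ∈ L, i < nn ∧ b i < acc.length) →
      (L.foldl (fun acc i => PySem.List.pySetD acc ((b i : Nat) : Int)
          (PySem.List.pySetD (PySem.List.pyGetD acc ((b i : Nat) : Int) []) (i : Int) 1)) acc).length
        = acc.length ∧
      (∀ row ∈ L.foldl (fun acc i => PySem.List.pySetD acc ((b i : Nat) : Int)
          (PySem.List.pySetD (PySem.List.pyGetD acc ((b i : Nat) : Int) []) (i : Int) 1)) acc,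
        row.length = nn) ∧
      ∀ j i, i < nn →
        pvEntry (L.foldl (fun acc i => PySem.List.pySetD acc ((b i : Nat) : Int)
          (PySem.List.pySetD (PySem.List.pyGetD acc ((b i : Nat) : Int) []) (i : Int) 1)) acc) j i
          = if i ∈ L ∧ b i = j then 1 else pvEntry acc j i := by
  intro L
  induction L with
  | nil =>
    intro acc hrows _
    exact ⟨rfl, hrows, by intro j i _; simp⟩
  | cons x L ih =>
    intro acc hrows hL
    obtain ⟨hx, hbx⟩ := hL x List.mem_cons_self
    set oldrow := PySem.List.pyGetD acc ((b x : Nat) : Int) [] with holdrow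
    have holdlen : oldrow.length = nn := by
      have hrw : oldrow = acc[b x] := by
        rw [holdrow, PySem.List.pyGetD_natCast, List.getD_eq_getElem acc [] hbx]
      rw [hrw]
      exact hrows _ (List.getElem_mem hbx)
    set acc1 := PySem.List.pySetD acc ((b x : Nat) : Int)
      (PySem.List.pySetD oldrow (x : Int) 1) with hacc1
    have hlen1 : acc1.length = acc.length := PySem.List.length_pySetD _ _ _
    have hrows1 : ∀ row ∈ acc1, row.length = nn := by
      intro row hrow
      rw [hacc1, PySem.List.pySetD_natCast] at hrow
      rcases List.mem_or_eq_of_mem_set hrow with h | h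
      · exact hrows row h
      · rw [h, PySem.List.length_pySetD, holdlen]
    have hL1 : ∀ i ∈ L, i < nn ∧ b i < acc1.length := by
      intro i hi
      obtain ⟨ha, hb'⟩ := hL i (List.mem_cons_of_mem _ hi)
      exact ⟨ha, by omega⟩
    obtain ⟨ihlen, ihrows, ihent⟩ := ih acc1 hrows1 hL1
    have hxold : x < oldrow.length := by rw [holdlen]; exact hx
    have hstepent : ∀ j i, pvEntry acc1 j i = if b x = j ∧ i = x then 1 else pvEntry acc j i := by
      intro j i
      simp only [pvEntry, hacc1]
      rw [PySem.List.pyGetD_pySetD_natCast acc (b x) j _ [] hbx]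
      by_cases h1 : j = b x
      · rw [if_pos h1, PySem.List.pyGetD_pySetD_natCast oldrow x i 1 0 hxold]
        by_cases h2 : i = x
        · rw [if_pos h2, if_pos ⟨h1.symm, h2⟩]
        · rw [if_neg h2, if_neg (by tauto), holdrow, h1]
      · rw [if_neg h1, if_neg (by tauto)]
    refine ⟨by rw [List.foldl_cons, ← hacc1, ihlen, hlen1],
            by rw [List.foldl_cons, ← hacc1]; exact ihrows, ?_⟩
    intro j i hi
    rw [List.foldl_cons, ← hacc1, ihent j i hi, hstepent j i]
    by_cases hiL : i ∈ L ∧ b i = j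
    · rw [if_pos hiL, if_pos ⟨List.mem_cons_of_mem _ hiL.1, hiL.2⟩]
    · rw [if_neg hiL]
      by_cases hix : b x = j ∧ i = x
      · rw [if_pos hix, if_pos ⟨by rw [hix.2]; exact List.mem_cons_self, by rw [hix.2, hix.1]⟩]
      · rw [if_neg hix, if_neg]
        rintro ⟨hmem, hbij⟩
        rcases List.mem_cons.mp hmem with h | h
        · exact hix ⟨by rw [← h, hbij], h⟩
        · exact hiL ⟨h, hbij⟩

-- A's inner column scan computes the cast of pvAF (Nat-range form, as foldl_map leaves it).
lemma pvInnerA (matrix : List (List Int)) (iN : Nat) :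
    (List.range matrix.length).foldl (fun (max_j : Int) (j : Nat) =>
        if PySem.List.pyGetD (PySem.List.pyGetD matrix ((j : Nat) : Int) []) ((iN : Nat) : Int) 0 >
           PySem.List.pyGetD (PySem.List.pyGetD matrix max_j []) ((iN : Nat) : Int) 0
        then ((j : Nat) : Int) else max_j) 0
      = ((pvB matrix iN : Nat) : Int) := by
  have h := pvAF_cast (pvV matrix iN)
    (fun mj => PySem.List.pyGetD (PySem.List.pyGetD matrix mj []) ((iN : Nat) : Int) 0)
    (fun s => rfl) (List.range matrix.length) 0
  simpa [pvB, pvAF, pvV] using h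

lemma pvAexpand (matrix : List (List Int)) :
    get_maximum_in_col_mat_py matrix
      = (List.range (PySem.List.pyGetD matrix 0 []).length).foldl
          (fun acc i => PySem.List.pySetD acc ((pvB matrix i : Nat) : Int)
            (PySem.List.pySetD (PySem.List.pyGetD acc ((pvB matrix i : Nat) : Int) [])
              ((i : Nat) : Int) 1))
          (pvInit matrix) := by
  unfold get_maximum_in_col_mat_py
  dsimp only
  rw [PySem.List.pyRange_zero_natCast (PySem.List.pyGetD matrix 0 []).length,
      PySem.List.pyRange_zero_natCast matrix.length, List.foldl_map]
  congr 1
  · funext acc iN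
    simp only [List.foldl_map, pvInnerA]
  · simp [pvInit, Function.comp_def]

lemma pvBexpand (matrix : List (List Int)) :
    get_maximum_in_col_mat_py_alt matrix
      = (List.range matrix.length).map (fun jN : Nat =>
          (List.range (PySem.List.pyGetD matrix 0 []).length).map (fun iN : Nat =>
            if PySem.List.pyGetD
                ((List.range (PySem.List.pyGetD matrix 0 []).length).map (fun i : Nat =>
                  pvH matrix i)) ((iN : Nat) : Int) 0
              = ((jN : Nat) : Int)
            then (1 : Int) else 0)) := by
  unfold get_maximum_in_col_mat_py_alt
  dsimp only
  rw [PySem.List.pyRange_zero_natCast matrix.length,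
      PySem.List.pyRange_zero_natCast (PySem.List.pyGetD matrix 0 []).length]
  simp only [List.map_map]
  rfl

lemma pvEntry_init (matrix : List (List Int)) (j i : Nat) :
    pvEntry (pvInit matrix) j i = 0 := by
  rw [pvEntry, PySem.List.pyGetD_natCast, PySem.List.pyGetD_natCast]
  by_cases hj : j < matrix.length
  · rw [pvInit, List.getD_eq_getElem _ [] (by simpa using hj)]
    simp only [List.getElem_map, List.getElem_range]
    by_cases hi : i < (PySem.List.pyGetD matrix 0 []).length
    · rw [List.getD_eq_getElem _ 0 (by simpa using hi)]
      simp
    · rw [List.getD_eq_default _ 0 (by simpa using not_lt.mp hi)]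
  · rw [pvInit, List.getD_eq_default _ [] (by simpa using not_lt.mp hj)]
    rfl

-- ===== VERDICT (by name: the statement is the Claim_ definition above) =====
theorem get_maximum_in_col_mat_py_spec : Claim_equal_get_maximum_in_col_mat_py := by
  intro matrix _ hpre
  obtain ⟨hne, -⟩ := hpre
  unfold Spec_get_maximum_in_col_mat_py
  have hmpos : 0 < matrix.length := List.length_pos_iff.mpr hne
  have hbm : ∀ i, pvB matrix i < matrix.length :=
    fun i => (pvAF_spec (pvV matrix i) matrix.length hmpos).1
  have hrows : ∀ row ∈ pvInit matrix, row.length = (PySem.List.pyGetD matrix 0 []).length := by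
    intro row hrow
    obtain ⟨_, _, h⟩ := List.mem_map.mp hrow
    rw [← h, List.length_replicate]
  have hinitlen : (pvInit matrix).length = matrix.length := by
    rw [pvInit]; simp
  have hL : ∀ i ∈ List.range (PySem.List.pyGetD matrix 0 []).length, i < (PySem.List.pyGetD matrix 0 []).length ∧ pvB matrix i < (pvInit matrix).length := by
    intro i hi
    exact ⟨List.mem_range.mp hi, by rw [hinitlen]; exact hbm i⟩
  obtain ⟨hlenA, hrowsA, hentA⟩ :=
    pvOuter (pvB matrix) (PySem.List.pyGetD matrix 0 []).length (List.range (PySem.List.pyGetD matrix 0 []).length) (pvInit matrix) hrows hL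
  rw [← pvAexpand matrix] at hlenA hrowsA hentA
  rw [pvBexpand]
  apply List.ext_getElem
  · rw [hlenA, hinitlen]; simp
  intro j hj1 hj2
  have hjm : j < matrix.length := by simpa using hj2
  apply List.ext_getElem
  · rw [hrowsA _ (List.getElem_mem hj1)]
    simp
  intro i hi1 hi2
  have hinn : i < (PySem.List.pyGetD matrix 0 []).length := by simpa using hi2
  have hAget : (get_maximum_in_col_mat_py matrix)[j][i]
      = pvEntry (get_maximum_in_col_mat_py matrix) j i := by
    rw [pvEntry, PySem.List.pyGetD_natCast, PySem.List.pyGetD_natCast,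
        List.getD_eq_getElem _ [] hj1, List.getD_eq_getElem _ 0 hi1]
  rw [hAget, hentA j i hinn]
  have hH : pvH matrix i = ((pvB matrix i : Nat) : Int) := by
    have hfm : pvFirstMax (fun jj : Nat =>
        (fun j : Int => PySem.List.pyGetD (PySem.List.pyGetD matrix j []) ((i : Nat) : Int) 0) (jj : Int))
        matrix.length (pvB matrix i) :=
      pvAF_spec (pvV matrix i) matrix.length hmpos
    exact pvHead_first_max _ matrix.length (pvB matrix i) hfm
  simp only [List.getElem_map, List.getElem_range, PySem.List.pyGetD_natCast]
  rw [PySem.List.getD_map_range _ _ _ _ hinn, hH, pvEntry_init]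
  simp only [List.mem_range, hinn, true_and]
  by_cases hbi : pvB matrix i = j
  · rw [if_pos hbi, if_pos (by exact_mod_cast hbi)]
  · rw [if_neg hbi, if_neg (by exact_mod_cast hbi)]
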